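-- pv_equiv track=rewrite | github.com/09-03/Infa | Exam/22.py | yamb
-- ===== SOURCE A (Python) =====
-- def yamb(udar):
--     match = 0
--     yamb_syllable = []
--     for i in range(1,len(udar)+1):
--         syllable = 2*i
--         yamb_syllable.append(syllable)
--     for item in udar:
--         if item in yamb_syllable:
--             match+=1
--     return match
-- ===== SOURCE B (Python) =====
-- def yamb(udar):
--     # One pass with an arithmetic membership test (even and within [2, 2*len]),
--     # instead of building the target list and scanning it for every item.
--     n = len(udar)
--     return sum(1 for x in udar if x % 2 == 0 and 2 <= x <= 2 * n)
-- ===== Notes on version B (the rewrite author's own statement) =====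
-- stated objective: faster
-- what changed: B replaces building the list [2,4,...,2n] and membership-scanning it for every item by a single pass with a closed-form arithmetic test (x even and 2 <= x <= 2n).
import Mathlib
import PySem

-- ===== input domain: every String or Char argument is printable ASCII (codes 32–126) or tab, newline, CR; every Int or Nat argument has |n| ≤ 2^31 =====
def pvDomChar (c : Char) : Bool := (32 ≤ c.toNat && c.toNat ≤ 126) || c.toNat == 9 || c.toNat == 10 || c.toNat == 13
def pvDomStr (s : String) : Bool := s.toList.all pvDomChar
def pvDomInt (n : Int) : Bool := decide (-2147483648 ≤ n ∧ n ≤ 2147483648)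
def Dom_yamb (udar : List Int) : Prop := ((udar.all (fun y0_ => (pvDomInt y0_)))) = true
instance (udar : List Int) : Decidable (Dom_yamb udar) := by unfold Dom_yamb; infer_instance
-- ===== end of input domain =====

-- B replaces the quadratic build-then-scan by one pass with an arithmetic membership test.

-- ===== PORT A =====
def yamb (udar : List Int) : Int :=
  let yamb_syllable : List Int :=
    (PySem.List.pyRange 1 ((udar.length : Int) + 1) 1).foldl
      (fun acc i => acc ++ [2 * i]) []
  udar.foldl (fun m item => if item ∈ yamb_syllable then m + 1 else m) 0

-- ===== PORT B =====
def yamb_alt (udar : List Int) : Int :=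
  let n : Int := (udar.length : Int)
  (udar.map (fun x =>
      if PySem.Int.mod x 2 == 0 && decide (2 ≤ x) && decide (x ≤ 2 * n)
      then (1 : Int) else 0)).sum

-- ===== PRECONDITION & SPEC =====
def Spec_yamb (udar : List Int) (out : Int) : Prop := out = yamb_alt udar
instance (udar : List Int) (out : Int) : Decidable (Spec_yamb udar out) := by unfold Spec_yamb; infer_instance

-- ===== CLAIM (what is proved, stated in full; the proofs are below) =====
def Claim_equal_yamb : Prop := ∀ (udar : List Int), Dom_yamb udar → Spec_yamb udar (yamb udar)

-- ===== LEMMAS AND PROOFS =====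

-- membership in the built target list is exactly B's arithmetic test
theorem mem_syllable_iff (n x : Int) :
    (x ∈ (PySem.List.pyRange 1 (n + 1) 1).map (fun i => 2 * i)) ↔
      (PySem.Int.mod x 2 = 0 ∧ 2 ≤ x ∧ x ≤ 2 * n) := by
  simp only [List.mem_map, PySem.List.mem_pyRange_one, PySem.Int.mod_eq_zero_iff_dvd]
  constructor
  · rintro ⟨i, ⟨h1, h2⟩, rfl⟩
    exact ⟨⟨i, by ring⟩, by omega, by omega⟩
  · rintro ⟨⟨i, rfl⟩, h2, h3⟩
    exact ⟨i, ⟨by omega, by omega⟩, by ring⟩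

-- counting loop = 0/1 sum, both sides via List.countP
theorem yamb_eq_alt (udar : List Int) : yamb udar = yamb_alt udar := by
  unfold yamb yamb_alt
  rw [PySem.List.foldl_append_singleton_eq_map, List.nil_append]
  have h : ∀ m : Int, ∀ l : List Int,
      l.foldl (fun m item =>
        if item ∈ (PySem.List.pyRange 1 ((udar.length : Int) + 1) 1).map (fun i => 2 * i)
        then m + 1 else m) m
      = m + (l.countP (fun x =>
          PySem.Int.mod x 2 == 0 && decide (2 ≤ x) && decide (x ≤ 2 * (udar.length : Int)))) := by
    intro m l
    induction l generalizing m with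
    | nil => simp
    | cons a t ih =>
      simp only [List.foldl_cons, List.countP_cons, ih]
      by_cases hmem : a ∈ (PySem.List.pyRange 1 ((udar.length : Int) + 1) 1).map (fun i => 2 * i)
      · have hp := (mem_syllable_iff (udar.length : Int) a).mp hmem
        have hb : (PySem.Int.mod a 2 == 0 && decide (2 ≤ a) && decide (a ≤ 2 * (udar.length : Int))) = true := by
          simp only [Bool.and_eq_true, beq_iff_eq, decide_eq_true_eq]
          exact ⟨⟨hp.1, hp.2.1⟩, hp.2.2⟩
        rw [if_pos hmem, hb]
        simp only [if_true]
        push_cast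
        omega
      · have hn : ¬ (PySem.Int.mod a 2 = 0 ∧ 2 ≤ a ∧ a ≤ 2 * (udar.length : Int)) :=
          fun hc => hmem ((mem_syllable_iff (udar.length : Int) a).mpr hc)
        have hb : (PySem.Int.mod a 2 == 0 && decide (2 ≤ a) && decide (a ≤ 2 * (udar.length : Int))) = false := by
          rw [Bool.eq_false_iff]
          intro hb
          apply hn
          simpa only [Bool.and_eq_true, beq_iff_eq, decide_eq_true_eq, and_assoc] using hb
        rw [if_neg hmem, hb]
        simp
  rw [h 0 udar, PySem.List.sum_map_ite_one_zero]
  simp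

-- ===== VERDICT (by name: the statement is the Claim_ definition above) =====
theorem yamb_spec : Claim_equal_yamb := by
  intro udar _
  exact yamb_eq_alt udar
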